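-- pv_equiv track=rewrite | github.com/wronai/pactown | src/pactown/deploy/quadlet.py | sanitize_path
-- ===== SOURCE A (Python) =====
-- def sanitize_path(path: str) -> str:
--     """Sanitize file/volume path.
--
--     Prevents path traversal attacks.
--     """
--     if not path:
--         return ""
--
--     # Remove null bytes
--     path = path.replace('\x00', '')
--
--     # Remove newlines
--     path = path.replace('\n', '').replace('\r', '')
--
--     # Remove shell metacharacters from path
--     for char in [';', '|', '&', '$', '`', '(', ')', '<', '>']:
--         path = path.replace(char, '')
--
--     return path
-- ===== SOURCE B (Python) =====
-- FORBIDDEN = frozenset('\x00\n\r;|&$`()<>')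
--
-- def sanitize_path(path: str) -> str:
--     """Sanitize file/volume path: one pass keeping characters not in FORBIDDEN."""
--     return ''.join(c for c in path if c not in FORBIDDEN)
-- ===== Notes on version B (the rewrite author's own statement) =====
-- stated objective: idiomatic
-- what changed: Replaced twelve sequential str.replace scans with a single pass that filters characters against a frozenset of the forbidden characters.
import Mathlib
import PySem

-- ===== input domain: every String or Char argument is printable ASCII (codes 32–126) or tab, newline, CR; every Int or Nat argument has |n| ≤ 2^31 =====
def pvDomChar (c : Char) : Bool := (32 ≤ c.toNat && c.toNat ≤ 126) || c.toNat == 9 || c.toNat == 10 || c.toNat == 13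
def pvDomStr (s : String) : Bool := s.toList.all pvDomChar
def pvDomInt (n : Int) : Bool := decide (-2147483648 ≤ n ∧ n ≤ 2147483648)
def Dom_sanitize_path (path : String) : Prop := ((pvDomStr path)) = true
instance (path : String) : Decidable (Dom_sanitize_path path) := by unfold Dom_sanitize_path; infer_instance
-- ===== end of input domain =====

-- B is a single filtering pass over the string instead of A's twelve sequential replace scans (idiomatic).

-- ===== PORT A =====
def sanitize_path (path : String) : String :=
  if path.isEmpty then ""
  else
    let p := PySem.Str.replace path "\x00" ""
    let p := PySem.Str.replace p "\n" ""
    let p := PySem.Str.replace p "\r" ""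
    [";", "|", "&", "$", "`", "(", ")", "<", ">"].foldl
      (fun p ch => PySem.Str.replace p ch "") p

-- ===== PORT B =====
def pvForbidden : List Char := ['\x00', '\n', '\r', ';', '|', '&', '$', '`', '(', ')', '<', '>']

def sanitize_path_alt (path : String) : String :=
  String.ofList (path.toList.filter (fun c => !pvForbidden.contains c))

-- ===== PRECONDITION & SPEC =====
def Spec_sanitize_path (path : String) (out : String) : Prop := out = sanitize_path_alt path
instance (path : String) (out : String) : Decidable (Spec_sanitize_path path out) := by unfold Spec_sanitize_path; infer_instance

-- ===== CLAIM (what is proved, stated in full; the proofs are below) =====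
def Claim_equal_sanitize_path : Prop := ∀ (path : String), Dom_sanitize_path path → Spec_sanitize_path path (sanitize_path path)

-- ===== LEMMAS AND PROOFS =====

lemma replace_go_single (c : Char) : ∀ (fuel : Nat) (l acc : List Char), l.length ≤ fuel →
    PySem.Chars.replace.go [c] [] fuel l acc = acc.reverse ++ l.filter (fun x => !(x == c)) := by
  intro fuel
  induction fuel with
  | zero =>
    intro l acc h
    interval_cases hl : l.length
    · simp [List.length_eq_zero_iff.mp hl, PySem.Chars.replace.go]
  | succ n ih =>
    intro l acc h
    cases l with
    | nil => simp [PySem.Chars.replace.go]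
    | cons x t =>
      simp only [PySem.Chars.replace.go]
      by_cases hx : x = c
      · subst hx
        have hp : [x].isPrefixOf (x :: t) = true := by simp [List.isPrefixOf]
        rw [if_pos hp]
        simp only [List.length_cons, List.length_nil, Nat.zero_add, List.drop_succ_cons,
          List.drop_zero, List.reverse_nil, List.nil_append]
        rw [ih t acc (by simpa using Nat.le_of_succ_le_succ h)]
        simp
      · have hp : ¬ ([c].isPrefixOf (x :: t) = true) := by
          simp [List.isPrefixOf]; exact fun hxc => hx hxc.symm
        rw [if_neg hp]
        rw [ih t (x :: acc) (by simpa using Nat.le_of_succ_le_succ h)]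
        simp [hx]

lemma replace_single (c : Char) (l : List Char) :
    PySem.Chars.replace l [c] [] = l.filter (fun x => !(x == c)) := by
  simp only [PySem.Chars.replace, List.isEmpty]
  rw [if_neg (by simp)]
  simpa using replace_go_single c l.length l [] le_rfl

lemma str_replace_single (c : Char) (s : String) :
    (PySem.Str.replace s (String.ofList [c]) "").toList
      = s.toList.filter (fun x => !(x == c)) := by
  simp [PySem.Str.replace, replace_single]

-- ===== VERDICT (by name: the statement is the Claim_ definition above) =====
theorem sanitize_path_spec : Claim_equal_sanitize_path := by
  intro path _
  unfold Spec_sanitize_path sanitize_path sanitize_path_alt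
  by_cases hE : path.isEmpty
  · rw [if_pos hE]
    have hpe : path = "" := String.isEmpty_iff.mp hE
    subst hpe
    simp
  · rw [if_neg hE]
    apply String.toList_injective
    have h0 : ("\x00" : String) = String.ofList ['\x00'] := rfl
    have h1 : ("\n" : String) = String.ofList ['\n'] := rfl
    have h2 : ("\r" : String) = String.ofList ['\r'] := rfl
    have h3 : (";" : String) = String.ofList [';'] := rfl
    have h4 : ("|" : String) = String.ofList ['|'] := rfl
    have h5 : ("&" : String) = String.ofList ['&'] := rfl
    have h6 : ("$" : String) = String.ofList ['$'] := rfl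
    have h7 : ("`" : String) = String.ofList ['`'] := rfl
    have h8 : ("(" : String) = String.ofList ['('] := rfl
    have h9 : (")" : String) = String.ofList [')'] := rfl
    have h10 : ("<" : String) = String.ofList ['<'] := rfl
    have h11 : (">" : String) = String.ofList ['>'] := rfl
    simp only [List.foldl, h0, h1, h2, h3, h4, h5, h6, h7, h8, h9, h10, h11,
      str_replace_single, List.filter_filter, String.toList_ofList]
    apply List.filter_congr
    intro x _
    by_cases hm : x ∈ pvForbidden
    · simp only [pvForbidden, List.mem_cons, List.not_mem_nil, or_false] at hm
      rcases hm with rfl | rfl | rfl | rfl | rfl | rfl | rfl | rfl | rfl | rfl | rfl | rfl <;> decide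
    · simp only [pvForbidden, List.mem_cons, List.not_mem_nil, or_false, not_or] at hm
      obtain ⟨a1, a2, a3, a4, a5, a6, a7, a8, a9, a10, a11, a12⟩ := hm
      simp [pvForbidden, a1, a2, a3, a4, a5, a6, a7, a8, a9, a10, a11, a12]
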